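-- pv_equiv track=rewrite | github.com/ag93/Leetcode | Mutate-The-Array.py | mutateTheArray
-- ===== SOURCE A (Python) =====
-- def mutateTheArray(n, a):
--     if len(a) == 0:
--         return(a)
--
--     if len(a) < 2:
--         return(a)
--
--     b = [0] * len(a)
--
--
--     b[0] = a[0]+a[1]
--     b[-1] = a[-1] + a[len(a) - 2]
--
--     for i in range(1, len(a)-1):
--         b[i] = a[i-1] + a[i] + a[i+1]
--
--     return(b)
-- ===== SOURCE B (Python) =====
-- def mutateTheArray(n, a):
--     m = len(a)
--     if m < 2:
--         return a
--     P = [0]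
--     for x in a:
--         P.append(P[-1] + x)
--     return [P[min(i + 2, m)] - P[max(i - 1, 0)] for i in range(m)]
-- ===== Notes on version B (the rewrite author's own statement) =====
-- stated objective: alternative
-- what changed: Replaced endpoint special-casing plus direct neighbor additions with a prefix-sum table and a uniform clamped window difference P[min(i+2,m)]-P[max(i-1,0)] for every index.
import Mathlib
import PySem

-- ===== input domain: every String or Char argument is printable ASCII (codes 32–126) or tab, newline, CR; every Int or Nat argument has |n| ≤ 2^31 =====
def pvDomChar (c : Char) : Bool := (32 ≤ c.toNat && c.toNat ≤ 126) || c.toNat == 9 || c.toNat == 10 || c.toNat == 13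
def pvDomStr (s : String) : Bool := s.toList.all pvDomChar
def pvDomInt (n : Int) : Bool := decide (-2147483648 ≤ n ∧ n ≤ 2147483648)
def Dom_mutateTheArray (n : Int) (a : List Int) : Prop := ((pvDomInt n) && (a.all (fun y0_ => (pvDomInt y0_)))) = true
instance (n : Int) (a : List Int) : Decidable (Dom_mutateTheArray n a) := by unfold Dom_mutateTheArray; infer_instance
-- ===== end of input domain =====

-- B replaces A's endpoint special-casing and direct neighbor additions by a prefix-sum table
-- and one uniform clamped window difference; objective: alternative (same O(n) cost).

-- ===== PORT A =====
-- Literal transliteration of Source A: early returns, b = [0]*len(a), the two endpoint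
-- assignments, then the loop over range(1, len(a)-1) setting b[i].
def mutateTheArray (n : Int) (a : List Int) : List Int :=
  if a.length == 0 then a
  else if a.length < 2 then a
  else
    let b := List.replicate a.length (0 : Int)
    let b := b.set 0 (a.getD 0 0 + a.getD 1 0)
    let b := b.set (a.length - 1) (a.getD (a.length - 1) 0 + a.getD (a.length - 2) 0)
    (List.range' 1 (a.length - 1 - 1)).foldl
      (fun c i => c.set i (a.getD (i - 1) 0 + a.getD i 0 + a.getD (i + 1) 0)) b

-- ===== PORT B =====
-- Literal transliteration of Source B: build the prefix-sum list P by appending, then map the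
-- clamped difference over range(m).  (Nat subtraction i - 1 is Python's max(i - 1, 0).)
def mutateTheArray_alt (n : Int) (a : List Int) : List Int :=
  let m := a.length
  if m < 2 then a
  else
    let P := a.foldl (fun p x => p ++ [p.getLastD 0 + x]) [(0 : Int)]
    (List.range m).map (fun i => P.getD (min (i + 2) m) 0 - P.getD (i - 1) 0)

-- ===== PRECONDITION & SPEC =====
def Spec_mutateTheArray (n : Int) (a : List Int) (out : List Int) : Prop := out = mutateTheArray_alt n a
instance (n : Int) (a : List Int) (out : List Int) : Decidable (Spec_mutateTheArray n a out) := by unfold Spec_mutateTheArray; infer_instance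

-- ===== CLAIM (what is proved, stated in full; the proofs are below) =====
def Claim_equal_mutateTheArray : Prop := ∀ (n : Int) (a : List Int), Dom_mutateTheArray n a → Spec_mutateTheArray n a (mutateTheArray n a)

-- ===== LEMMAS AND PROOFS =====

-- the prefix-sum list built by B is the list of partial sums
theorem pfx_eq (a : List Int) :
    a.foldl (fun p x => p ++ [p.getLastD 0 + x]) [(0 : Int)]
      = (List.range (a.length + 1)).map (fun k => (a.take k).sum) := by
  induction a using List.reverseRecOn with
  | nil => simp
  | append_singleton a x ih =>
    rw [List.foldl_append, ih]
    have hlast : ((List.range (a.length + 1)).map (fun k => (a.take k).sum)).getLastD 0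
        = a.sum := by
      rw [List.range_succ, List.map_append]
      simp
    rw [List.foldl_cons, List.foldl_nil, hlast]
    have hR : (List.range ((a ++ [x]).length + 1)).map (fun k => ((a ++ [x]).take k).sum)
        = (List.range (a.length + 1)).map (fun k => (a.take k).sum) ++ [a.sum + x] := by
      rw [show (a ++ [x]).length + 1 = (a.length + 1) + 1 by simp, List.range_succ,
        List.map_append]
      congr 1
      · apply List.map_congr_left
        intro k hk
        rw [List.mem_range] at hk
        rw [List.take_append_of_le_length (by omega)]
      · simp
    rw [hR]

theorem getD_range_map (f : Nat → Int) (m k : Nat) (h : k < m) :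
    ((List.range m).map f).getD k 0 = f k := by
  rw [List.getD_eq_getElem _ _ (by simpa using h)]
  simp

theorem take_sum_succ (a : List Int) (k : Nat) (h : k < a.length) :
    (a.take (k + 1)).sum = (a.take k).sum + a.getD k 0 := by
  rw [List.sum_take_succ _ _ h, List.getD_eq_getElem _ _ h]

theorem foldl_set_length (l : List Nat) (f : Nat → Int) (b : List Int) :
    (l.foldl (fun c j => c.set j (f j)) b).length = b.length := by
  induction l generalizing b with
  | nil => rfl
  | cons j l ih => simp [List.foldl_cons, ih]

theorem foldl_set_getD (l : List Nat) (f : Nat → Int) (b : List Int) (i : Nat) (hi : i < b.length) :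
    (l.foldl (fun c j => c.set j (f j)) b).getD i 0
      = if i ∈ l then f i else b.getD i 0 := by
  induction l generalizing b with
  | nil => simp
  | cons j l ih =>
    rw [List.foldl_cons, ih _ (by simpa using hi)]
    by_cases h : i ∈ l
    · simp [h]
    · by_cases hji : j = i
      · subst hji
        simp [List.getD_eq_getElem?_getD, List.getElem?_set_self (by simpa using hi), h]
      · have hij : i ≠ j := fun hh => hji hh.symm
        simp [h, hij, List.getD_eq_getElem?_getD, List.getElem?_set_ne hji]

-- ===== VERDICT (by name: the statement is the Claim_ definition above) =====
theorem mutateTheArray_spec : Claim_equal_mutateTheArray := by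
  intro n a _
  unfold Spec_mutateTheArray mutateTheArray mutateTheArray_alt
  by_cases h2 : a.length < 2
  · simp [h2]
  · rw [Nat.not_lt] at h2
    have hne : (a.length == 0) = false := by
      simp only [beq_eq_false_iff_ne, ne_eq]
      omega
    rw [hne, if_neg (by decide), if_neg (by omega)]
    simp only [if_neg (show ¬ a.length < 2 by omega)]
    rw [pfx_eq]
    apply List.ext_getElem
    · rw [foldl_set_length]
      simp
    · intro i h1 h1'
      have him : i < a.length := by
        rw [foldl_set_length, List.length_set, List.length_set, List.length_replicate] at h1
        exact h1
      rw [← List.getD_eq_getElem _ 0, ← List.getD_eq_getElem _ 0]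
      rw [getD_range_map _ _ _ (by simpa using him)]
      rw [foldl_set_getD _ _ _ _ (by simp [him])]
      by_cases hmem : i ∈ List.range' 1 (a.length - 1 - 1)
      · rw [if_pos hmem]
        rw [List.mem_range'_1] at hmem
        obtain ⟨hi1, hi2⟩ := hmem
        rw [min_eq_left (by omega)]
        rw [getD_range_map _ _ _ (by omega), getD_range_map _ _ _ (by omega)]
        have e1 := take_sum_succ a (i - 1) (by omega)
        have e2 := take_sum_succ a i (by omega)
        have e3 := take_sum_succ a (i + 1) (by omega)
        rw [show i - 1 + 1 = i by omega] at e1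
        rw [e3, e2, e1]
        ring
      · rw [if_neg hmem]
        rw [List.mem_range'_1] at hmem
        rcases Nat.lt_or_ge i 1 with h0 | h0
        · have hi0 : i = 0 := by omega
          subst hi0
          rw [List.getD_eq_getElem?_getD, List.getElem?_set_ne (by omega),
            List.getElem?_set_self (by simp; omega)]
          rw [min_eq_left (by omega)]
          rw [getD_range_map _ _ _ (by omega), getD_range_map _ _ _ (by omega)]
          have e1 := take_sum_succ a 0 (by omega)
          have e2 := take_sum_succ a 1 (by omega)
          simp only [Nat.zero_add] at e1 e2 ⊢
          rw [e2, e1]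
          simp
        · have hieq : i = a.length - 1 := by omega
          subst hieq
          rw [List.getD_eq_getElem?_getD,
            List.getElem?_set_self (by simp; omega)]
          rw [min_eq_right (by omega)]
          rw [getD_range_map _ _ _ (by omega), getD_range_map _ _ _ (by omega)]
          have e1 := take_sum_succ a (a.length - 2) (by omega)
          have e2 := take_sum_succ a (a.length - 1) (by omega)
          rw [show a.length - 2 + 1 = a.length - 1 by omega] at e1
          rw [show a.length - 1 + 1 = a.length by omega] at e2
          rw [show a.length - 1 - 1 = a.length - 2 by omega]
          rw [e2, e1]
          simp
          ring
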